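-- pv_equiv track=rewrite | github.com/ntpz870817/Chamaeleo | methods/fixed.py | _get_decimal_list
-- ===== SOURCE A (Python) =====
-- def _get_decimal_list(bit_matrix, size):
--     """
--     introduction: Decimal list generated by the bit matrix.
--
--     :param bit_matrix: Bit matrix, containing only 0,1.
--                         Type: Two-dimensional list(int)
--
--     :param size: File size corresponding to the matrix.
--
--     :return decimal_list: Decimal list.
--                           Type: One-dimensional list(int)
--     """
--     bit_index, temp_byte, decimal_list = 0, 0, []
--     for row in range(len(bit_matrix)):
--         for col in range(len(bit_matrix[0])):
--             bit_index += 1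
--             temp_byte *= 2
--             temp_byte += bit_matrix[row][col]
--             if bit_index == 8:
--                 if size >= 0:
--                     decimal_list.append(int(temp_byte))
--                     size -= 1
--                 bit_index, temp_byte = 0, 0
--
--     return decimal_list
-- ===== SOURCE B (Python) =====
-- def _get_decimal_list(bit_matrix, size):
--     flat = [bit_matrix[r][c]
--             for r in range(len(bit_matrix))
--             for c in range(len(bit_matrix[0]))]
--     full = len(flat) // 8
--     count = min(full, size + 1) if size >= 0 else 0
--     return [sum(b * 2 ** (7 - j) for j, b in enumerate(flat[8 * i:8 * i + 8]))
--             for i in range(count)]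
-- ===== Notes on version B (the rewrite author's own statement) =====
-- stated objective: alternative
-- what changed: A's single stateful pass with a running bit counter and Horner byte accumulator is replaced by flattening the matrix, computing the output length arithmetically (min(len(flat)//8, size+1) bytes, none when size<0), and an index-based pass that slices each 8-bit chunk and sums bit*2**(7-j).
import Mathlib
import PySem

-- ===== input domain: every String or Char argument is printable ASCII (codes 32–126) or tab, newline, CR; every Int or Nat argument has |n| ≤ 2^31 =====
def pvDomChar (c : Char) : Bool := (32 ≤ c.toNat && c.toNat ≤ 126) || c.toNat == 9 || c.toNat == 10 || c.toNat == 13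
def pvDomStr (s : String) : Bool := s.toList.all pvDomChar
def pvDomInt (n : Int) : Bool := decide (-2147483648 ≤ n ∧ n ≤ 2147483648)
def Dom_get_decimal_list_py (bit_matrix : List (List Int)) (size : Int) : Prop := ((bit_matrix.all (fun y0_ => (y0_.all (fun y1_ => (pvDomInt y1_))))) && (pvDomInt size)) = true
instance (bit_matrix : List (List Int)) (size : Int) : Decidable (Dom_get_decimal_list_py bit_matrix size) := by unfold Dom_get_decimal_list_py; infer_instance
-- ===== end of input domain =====

-- B replaces A's running bit-counter/byte accumulator by flatten + arithmetic output length + index-based chunking (alternative decomposition, same cost).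

-- ===== PORT A =====
-- A's inner loop body: state is (bit_index, temp_byte, size, decimal_list); b is bit_matrix[row][col]
def pvStepA (st : Nat × Int × Int × List Int) (b : Int) : Nat × Int × Int × List Int :=
  let bi := st.1 + 1
  let tb := st.2.1 * 2 + b
  if bi = 8 then
    if st.2.2.1 ≥ 0 then (0, 0, st.2.2.1 - 1, st.2.2.2 ++ [tb])
    else (0, 0, st.2.2.1, st.2.2.2)
  else (bi, tb, st.2.2.1, st.2.2.2)

-- indexing bit_matrix[row][col]: row, col are nonnegative and in range under Pre_, so getD's defaults are never used
def get_decimal_list_py (bit_matrix : List (List Int)) (size : Int) : List Int :=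
  let fin := (List.range bit_matrix.length).foldl (fun st row =>
    (List.range (bit_matrix.headD []).length).foldl
      (fun st col => pvStepA st ((bit_matrix.getD row []).getD col 0)) st)
    ((0, 0, size, []) : Nat × Int × Int × List Int)
  fin.2.2.2

-- ===== PORT B =====
-- value of one chunk: sum(b * 2 ** (7 - j) for j, b in enumerate(chunk)); 7 - j ≥ 0 since chunks have ≤ 8 bits, so .toNat is exact
def pvChunkVal (chunk : List Int) : Int :=
  ((PySem.List.enumerate chunk).map (fun jb => jb.2 * (2:Int) ^ ((7 - jb.1).toNat))).sum

def get_decimal_list_py_alt (bit_matrix : List (List Int)) (size : Int) : List Int :=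
  let flat := (List.range bit_matrix.length).flatMap (fun r =>
    (List.range (bit_matrix.headD []).length).map (fun c => (bit_matrix.getD r []).getD c 0))
  let full : Int := PySem.Int.floordiv (flat.length : Int) 8
  let count : Int := if size ≥ 0 then min full (size + 1) else 0
  -- range(count) over a provably nonnegative int
  (List.range count.toNat).map (fun i =>
    pvChunkVal (PySem.List.slice flat (some ((8 * i : Nat) : Int)) (some ((8 * i + 8 : Nat) : Int))))

-- ===== PRECONDITION & SPEC =====
-- Pre_ excludes exactly the inputs on which A raises IndexError: a row shorter than the first
-- row (A reads bit_matrix[row][col] for every col < len(bit_matrix[0])); B raises identically there.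
def Pre_get_decimal_list_py (bit_matrix : List (List Int)) (size : Int) : Prop :=
  ∀ row ∈ bit_matrix, (bit_matrix.headD []).length ≤ row.length
instance (bit_matrix : List (List Int)) (size : Int) : Decidable (Pre_get_decimal_list_py bit_matrix size) := by unfold Pre_get_decimal_list_py; infer_instance

def pvWitness_get_decimal_list_py : List (List Int) × Int :=
  ([[1,0,0,0,0,0,1,1], [0,1,1,1,1,1,1,0]], 5)

def Spec_get_decimal_list_py (bit_matrix : List (List Int)) (size : Int) (out : List Int) : Prop := out = get_decimal_list_py_alt bit_matrix size
instance (bit_matrix : List (List Int)) (size : Int) (out : List Int) : Decidable (Spec_get_decimal_list_py bit_matrix size out) := by unfold Spec_get_decimal_list_py; infer_instance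

-- ===== CLAIM (what is proved, stated in full; the proofs are below) =====
def Claim_equal_get_decimal_list_py : Prop := ∀ (bit_matrix : List (List Int)) (size : Int), Dom_get_decimal_list_py bit_matrix size → Pre_get_decimal_list_py bit_matrix size → Spec_get_decimal_list_py bit_matrix size (get_decimal_list_py bit_matrix size)

-- ===== LEMMAS AND PROOFS =====

-- A's fold over the flattened bit stream
def pvF (bits : List Int) (st : Nat × Int × Int × List Int) : Nat × Int × Int × List Int :=
  bits.foldl pvStepA st

-- reference chunker: what both programs produce on the flattened bit stream
def pvG : List Int → Int → List Int
  | a :: b :: c :: d :: e :: f :: g :: h :: rest, sz =>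
      if sz ≥ 0 then
        (((((((a * 2 + b) * 2 + c) * 2 + d) * 2 + e) * 2 + f) * 2 + g) * 2 + h) :: pvG rest (sz - 1)
      else []
  | _, _ => []

theorem pvG_short (t : List Int) (x : Int) (hl : t.length < 8) : pvG t x = [] := by
  rcases t with _ | ⟨a, _ | ⟨b, _ | ⟨c, _ | ⟨d, _ | ⟨e, _ | ⟨f, _ | ⟨g, _ | ⟨h, rest⟩⟩⟩⟩⟩⟩⟩⟩ <;>
    first
      | rfl
      | (exfalso; simp only [List.length_cons] at hl; omega)

theorem pvNotLong_lt (t : List Int)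
    (hshape : ∀ (a b c d e f g h : Int) (rest : List Int),
      t = a :: b :: c :: d :: e :: f :: g :: h :: rest → False) : t.length < 8 := by
  rcases t with _ | ⟨a, _ | ⟨b, _ | ⟨c, _ | ⟨d, _ | ⟨e, _ | ⟨f, _ | ⟨g, _ | ⟨h, rest⟩⟩⟩⟩⟩⟩⟩⟩ <;>
    first
      | exact (hshape a b c d e f g h rest rfl).elim
      | simp

-- once size is negative, A never appends again
theorem pvF_neg (bits : List Int) (sz : Int) (h : ¬ sz ≥ 0) :
    ∀ (bi : Nat) (tb : Int) (dl : List Int), (pvF bits (bi, tb, sz, dl)).2.2.2 = dl := by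
  induction bits with
  | nil => intro bi tb dl; rfl
  | cons x t ih =>
    intro bi tb dl
    show (pvF t (pvStepA (bi, tb, sz, dl) x)).2.2.2 = dl
    simp only [pvStepA]
    split_ifs <;> first | exact absurd ‹sz ≥ 0› h | exact ih _ _ _

-- a tail shorter than a byte never appends
theorem pvF_short (bits : List Int) : ∀ (bi : Nat) (tb sz : Int) (dl : List Int),
    bits.length + bi < 8 → (pvF bits (bi, tb, sz, dl)).2.2.2 = dl := by
  induction bits with
  | nil => intro bi tb sz dl _; rfl
  | cons x t ih =>
    intro bi tb sz dl hlen
    show (pvF t (pvStepA (bi, tb, sz, dl) x)).2.2.2 = dl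
    have hne : ¬ (bi + 1 = 8) := by simp at hlen; omega
    simp only [pvStepA, if_neg hne]
    exact ih (bi + 1) _ sz dl (by simp at hlen ⊢; omega)

-- A's fold computes pvG
theorem pvF_eq_G (bits : List Int) (sz : Int) :
    ∀ (dl : List Int), (pvF bits (0, 0, sz, dl)).2.2.2 = dl ++ pvG bits sz := by
  induction bits, sz using pvG.induct with
  | case1 a b c d e f g h rest sz hsz ih =>
    intro dl
    have hstep : pvF (a :: b :: c :: d :: e :: f :: g :: h :: rest) (0, 0, sz, dl)
        = pvF rest (0, 0, sz - 1,
            dl ++ [(((((((a * 2 + b) * 2 + c) * 2 + d) * 2 + e) * 2 + f) * 2 + g) * 2 + h)]) := by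
      simp [pvF, pvStepA, hsz]
    rw [hstep, ih]
    simp [pvG, hsz]
  | case2 a b c d e f g h rest sz hsz =>
    intro dl
    rw [pvF_neg _ _ hsz]
    simp [pvG, hsz]
  | case3 t x hshape =>
    intro dl
    have hl := pvNotLong_lt t hshape
    rw [pvF_short _ 0 0 x dl (by omega), pvG_short _ _ hl]
    simp

-- B's tail computation on the flattened stream
def pvBout (bits : List Int) (sz : Int) : List Int :=
  let full : Int := PySem.Int.floordiv (bits.length : Int) 8
  let count : Int := if sz ≥ 0 then min full (sz + 1) else 0
  (List.range count.toNat).map (fun i =>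
    pvChunkVal (PySem.List.slice bits (some ((8 * i : Nat) : Int)) (some ((8 * i + 8 : Nat) : Int))))

theorem pvChunkVal_eight (a b c d e f g h : Int) :
    pvChunkVal [a, b, c, d, e, f, g, h]
      = (((((((a * 2 + b) * 2 + c) * 2 + d) * 2 + e) * 2 + f) * 2 + g) * 2 + h) := by
  simp [pvChunkVal, PySem.List.enumerate]
  ring

theorem pvBout_short (t : List Int) (x : Int) (hl : t.length < 8) : pvBout t x = [] := by
  simp only [pvBout]
  rw [PySem.Int.floordiv_eq_ediv_of_pos (by norm_num)]
  have h0 : ((t.length : Nat) : Int) / 8 = 0 :=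
    Int.ediv_eq_zero_of_lt (by positivity) (by exact_mod_cast hl)
  rw [h0]
  split_ifs with h <;> simp

theorem pvBout_cons8 (a b c d e f g h : Int) (rest : List Int) (sz : Int) (hsz : sz ≥ 0) :
    pvBout (a :: b :: c :: d :: e :: f :: g :: h :: rest) sz
      = pvChunkVal [a, b, c, d, e, f, g, h] :: pvBout rest (sz - 1) := by
  simp only [pvBout]
  rw [PySem.Int.floordiv_eq_ediv_of_pos (by norm_num),
      PySem.Int.floordiv_eq_ediv_of_pos (by norm_num)]
  have hlen : (((a :: b :: c :: d :: e :: f :: g :: h :: rest).length : Nat) : Int)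
      = (rest.length : Int) + 8 := by simp; ring
  rw [hlen]
  have hdiv : ((rest.length : Int) + 8) / 8 = (rest.length : Int) / 8 + 1 := by
    have h := Int.add_mul_ediv_right (rest.length : Int) 1 (show (8:Int) ≠ 0 by norm_num)
    simpa using h
  rw [hdiv]
  have hd0 : 0 ≤ (rest.length : Int) / 8 := Int.ediv_nonneg (by positivity) (by norm_num)
  have hk : (if sz ≥ 0 then min ((rest.length : Int) / 8 + 1) (sz + 1) else 0).toNat
      = (if sz - 1 ≥ 0 then min ((rest.length : Int) / 8) (sz - 1 + 1) else 0).toNat + 1 := by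
    split_ifs <;> omega
  rw [hk, List.range_succ_eq_map, List.map_cons, List.map_map]
  -- the head chunk (bits 0..8) is definitionally [a,…,h]; congr closes it and leaves the tail
  congr 1
  -- chunk i+1 of the whole stream is chunk i of rest
  apply List.map_congr_left
  intro i _
  simp only [Function.comp]
  congr 1
  simp only [Nat.succ_eq_add_one]
  rw [PySem.List.slice_natCast, PySem.List.slice_natCast,
      show (a :: b :: c :: d :: e :: f :: g :: h :: rest) = [a,b,c,d,e,f,g,h] ++ rest from rfl,
      show 8 * (i + 1) = 8 + 8 * i by ring, ← List.drop_drop,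
      List.drop_left' (by simp : ([a,b,c,d,e,f,g,h] : List Int).length = 8)]
  congr 1
  omega

theorem pvBout_eq_G (bits : List Int) (sz : Int) : pvBout bits sz = pvG bits sz := by
  induction bits, sz using pvG.induct with
  | case1 a b c d e f g h rest sz hsz ih =>
    rw [pvBout_cons8 a b c d e f g h rest sz hsz, ih, pvChunkVal_eight]
    simp [pvG, hsz]
  | case2 a b c d e f g h rest sz hsz =>
    simp [pvBout, pvG, hsz]
  | case3 t x hshape =>
    have hl := pvNotLong_lt t hshape
    rw [pvBout_short _ _ hl, pvG_short _ _ hl]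

theorem pvAlt_eq_Bout (bit_matrix : List (List Int)) (size : Int) :
    get_decimal_list_py_alt bit_matrix size
      = pvBout ((List.range bit_matrix.length).flatMap (fun r =>
          (List.range (bit_matrix.headD []).length).map (fun c => (bit_matrix.getD r []).getD c 0))) size := rfl

theorem pvA_eq_F (bit_matrix : List (List Int)) (size : Int) :
    get_decimal_list_py bit_matrix size
      = (pvF ((List.range bit_matrix.length).flatMap (fun r =>
          (List.range (bit_matrix.headD []).length).map (fun c => (bit_matrix.getD r []).getD c 0)))
          (0, 0, size, [])).2.2.2 := by
  unfold get_decimal_list_py pvF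
  rw [List.foldl_flatMap]
  simp [List.foldl_map]

-- ===== VERDICT (by name: the statement is the Claim_ definition above) =====
theorem get_decimal_list_py_spec : Claim_equal_get_decimal_list_py := by
  intro bit_matrix size _ _
  show get_decimal_list_py bit_matrix size = get_decimal_list_py_alt bit_matrix size
  rw [pvA_eq_F, pvAlt_eq_Bout, pvBout_eq_G, pvF_eq_G]
  simp
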